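-- pv_equiv track=rewrite | github.com/iafisher/iprecommit | iprecommit/extras/commit_msg_format.py | filter_commit_lines
-- ===== SOURCE A (Python) =====
-- from typing import Generator, List, Optional, Tuple
--
-- GIT_CUT_LINE = "------------------------ >8 ------------------------"
--
-- def filter_commit_lines(lines: List[str]) -> Generator[Tuple[str, int], None, None]:
--     for lineno, line in enumerate(lines, start=1):
--         stripped = line.strip()
--         if stripped.startswith("#"):
--             if line[1:].lstrip() == GIT_CUT_LINE:
--                 return
--         else:
--             yield line, lineno
-- ===== SOURCE B (Python) =====
-- from typing import Generator, List, Tuple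
--
-- GIT_CUT_LINE = "------------------------ >8 ------------------------"
--
-- def _classify(line: str) -> int:
--     # 0 = keep, 1 = plain comment, 2 = cut marker
--     if line.strip().startswith("#"):
--         return 2 if line[1:].lstrip() == GIT_CUT_LINE else 1
--     return 0
--
-- def filter_commit_lines(lines: List[str]) -> Generator[Tuple[str, int], None, None]:
--     codes = [_classify(line) for line in lines]
--     try:
--         cut = codes.index(2)
--     except ValueError:
--         cut = len(lines)
--     for i in range(cut):
--         if codes[i] == 0:
--             yield lines[i], i + 1
-- ===== Notes on version B (the rewrite author's own statement) =====
-- stated objective: alternative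
-- what changed: B is a table formulation: it classifies every line into a code (keep/comment/cut) in one precomputation pass, locates the cut marker with list.index (falling back to len), and then emits (line, i+1) by index over the prefix before the cut, instead of A's single streaming loop with a nested early return.
import Mathlib
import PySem

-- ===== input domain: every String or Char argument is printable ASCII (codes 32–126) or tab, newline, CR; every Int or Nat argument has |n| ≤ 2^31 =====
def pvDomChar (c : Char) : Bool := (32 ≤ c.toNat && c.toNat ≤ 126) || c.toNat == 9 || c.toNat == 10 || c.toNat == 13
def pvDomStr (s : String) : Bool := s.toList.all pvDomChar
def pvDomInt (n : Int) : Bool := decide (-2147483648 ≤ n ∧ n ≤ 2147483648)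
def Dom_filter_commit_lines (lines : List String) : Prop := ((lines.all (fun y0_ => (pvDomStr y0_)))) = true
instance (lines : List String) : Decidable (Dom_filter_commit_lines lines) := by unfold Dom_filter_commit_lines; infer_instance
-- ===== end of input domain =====

-- B replaces A's streaming early-return loop by a table formulation (classify every
-- line into a code, locate the cut marker by index, emit from the prefix by index);
-- objective: alternative decomposition, same O(n) cost.

def gitCutLine : String := "------------------------ >8 ------------------------"

-- ===== PORT A =====
-- A's loop with the running line number; the nested early return becomes [].
def filterCommitLinesLoop : List String → Int → List (String × Int)
  | [], _ => []
  | line :: rest, lineno =>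
    let stripped := PySem.Str.strip line
    if PySem.Str.startswith stripped "#" then
      if PySem.Str.lstrip (PySem.Str.slice line (some 1) none) == gitCutLine then []
      else filterCommitLinesLoop rest (lineno + 1)
    else (line, lineno) :: filterCommitLinesLoop rest (lineno + 1)

def filter_commit_lines (lines : List String) : List (String × Int) :=
  filterCommitLinesLoop lines 1

-- ===== PORT B =====
def classifyB (line : String) : Int :=
  if PySem.Str.startswith (PySem.Str.strip line) "#" then
    if PySem.Str.lstrip (PySem.Str.slice line (some 1) none) == gitCutLine then 2 else 1
  else 0

-- codes.index(2) with fallback len(codes) is exactly List.idxOf; the range(cut)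
-- loop indexes only in-bounds positions (cut ≤ length), so getD is exact there.
def filter_commit_lines_alt (lines : List String) : List (String × Int) :=
  let codes := lines.map classifyB
  let cut : Nat := codes.idxOf 2
  (List.range cut).filterMap (fun i =>
    if codes.getD i 0 == 0 then some (lines.getD i "", (i : Int) + 1) else none)

-- ===== PRECONDITION & SPEC =====
def Spec_filter_commit_lines (lines : List String) (out : List (String × Int)) : Prop := out = filter_commit_lines_alt lines
instance (lines : List String) (out : List (String × Int)) : Decidable (Spec_filter_commit_lines lines out) := by unfold Spec_filter_commit_lines; infer_instance

-- ===== CLAIM (what is proved, stated in full; the proofs are below) =====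
def Claim_equal_filter_commit_lines : Prop := ∀ (lines : List String), Dom_filter_commit_lines lines → Spec_filter_commit_lines lines (filter_commit_lines lines)

-- ===== LEMMAS AND PROOFS =====
-- common structural form: both programs equal this recursion
def shiftLineno (xs : List (String × Int)) : List (String × Int) :=
  xs.map (fun p => (p.1, p.2 + 1))

def listForm : List String → List (String × Int)
  | [] => []
  | line :: rest =>
    if classifyB line = 2 then []
    else if classifyB line = 1 then shiftLineno (listForm rest)
    else (line, 1) :: shiftLineno (listForm rest)

lemma classifyB_cases (line : String) :
    classifyB line = 0 ∨ classifyB line = 1 ∨ classifyB line = 2 := by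
  unfold classifyB; split_ifs <;> simp

lemma loop_shift (lines : List String) (n : Int) :
    filterCommitLinesLoop lines (n + 1) = shiftLineno (filterCommitLinesLoop lines n) := by
  induction lines generalizing n with
  | nil => simp [filterCommitLinesLoop, shiftLineno]
  | cons line rest ih =>
    simp only [filterCommitLinesLoop]
    split_ifs with h1 h2
    · simp [shiftLineno]
    · exact ih (n + 1)
    · simp [shiftLineno, ih (n + 1)]

lemma loop_cons_classify (line : String) (rest : List String) (n : Int) :
    filterCommitLinesLoop (line :: rest) n =
      if classifyB line = 2 then []
      else if classifyB line = 1 then filterCommitLinesLoop rest (n + 1)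
      else (line, n) :: filterCommitLinesLoop rest (n + 1) := by
  simp only [filterCommitLinesLoop, classifyB]
  split_ifs <;> simp_all

lemma loop_eq_listForm (lines : List String) :
    filterCommitLinesLoop lines 1 = listForm lines := by
  induction lines with
  | nil => rfl
  | cons line rest ih =>
    rw [loop_cons_classify, listForm]
    have h12 : filterCommitLinesLoop rest 2 = shiftLineno (listForm rest) := by
      rw [show (2 : Int) = 1 + 1 from rfl, loop_shift, ih]
    rcases classifyB_cases line with h | h | h <;> simp [h, h12]

lemma alt_shift (k : Nat) (c : Nat → Bool) (s : Nat → String) :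
    (List.range k).filterMap (fun i => if c i then some (s i, (i : Int) + 1 + 1) else none) =
      shiftLineno ((List.range k).filterMap (fun i => if c i then some (s i, (i : Int) + 1) else none)) := by
  unfold shiftLineno
  rw [List.map_filterMap]
  apply List.filterMap_congr
  intro i _
  by_cases h : c i <;> simp [h]

lemma alt_eq_listForm (lines : List String) :
    filter_commit_lines_alt lines = listForm lines := by
  induction lines with
  | nil => rfl
  | cons line rest ih =>
    unfold filter_commit_lines_alt listForm
    show List.filterMap (fun i => if ((List.map classifyB (line :: rest)).getD i 0 == 0) = true then
        some ((line :: rest).getD i "", (i : Int) + 1) else none)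
      (List.range (List.idxOf 2 (List.map classifyB (line :: rest)))) = _
    by_cases h2 : classifyB line = 2
    · simp [List.idxOf, List.findIdx, List.findIdx.go, h2]
    · have hidx : List.idxOf 2 (List.map classifyB (line :: rest)) =
          List.idxOf 2 (rest.map classifyB) + 1 := by
        simp [h2]
      rw [hidx, List.range_succ_eq_map, List.filterMap_cons, List.filterMap_map]
      have hstep : ∀ (i : Nat),
          ((fun i => if ((List.map classifyB (line :: rest)).getD i 0 == 0) = true then
              some ((line :: rest).getD i "", (i : Int) + 1) else none) ∘ Nat.succ) i =
          (fun i => if ((rest.map classifyB).getD i 0 == 0) = true then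
              some (rest.getD i "", (i : Int) + 1 + 1) else none) i := by
        intro i
        simp [Function.comp, Nat.succ_eq_add_one]
      have htail : List.filterMap
          ((fun i => if ((List.map classifyB (line :: rest)).getD i 0 == 0) = true then
              some ((line :: rest).getD i "", (i : Int) + 1) else none) ∘ Nat.succ)
          (List.range (List.idxOf 2 (rest.map classifyB))) = shiftLineno (listForm rest) := by
        rw [List.filterMap_congr (fun i _ => hstep i),
          alt_shift (List.idxOf 2 (rest.map classifyB))
            (fun i => (rest.map classifyB).getD i 0 == 0) (fun i => rest.getD i "")]
        have ih' : List.filterMap (fun i => if ((List.map classifyB rest).getD i 0 == 0) = true then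
            some (rest.getD i "", (i : Int) + 1) else none)
          (List.range (List.idxOf 2 (List.map classifyB rest))) = listForm rest := ih
        rw [ih']
      rw [htail]
      rcases classifyB_cases line with h0 | h1 | h
      · simp [h0, List.getD]
      · simp [h1, List.getD]
      · exact absurd h h2

-- ===== VERDICT (by name: the statement is the Claim_ definition above) =====
theorem filter_commit_lines_spec : Claim_equal_filter_commit_lines := by
  intro lines _
  unfold Spec_filter_commit_lines filter_commit_lines
  rw [alt_eq_listForm, loop_eq_listForm]
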